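-- pv_equiv track=rewrite | github.com/dineshsuthar123/Hackathon-project-Hackrx-6.0 | src/advanced_document_processor.py | _analyze_section_relationships
-- ===== SOURCE A (Python) =====
-- from typing import Dict, Any, Optional, List, Tuple
--
-- def _analyze_section_relationships(sections: Dict[str, Any]) -> Dict[str, List[str]]:
--     """Analyze relationships between sections"""
--     relationships = {}
--
--     for section_name, section_data in sections.items():
--         related_sections = []
--         section_content = section_data.get('content', '').lower()
--
--         # Find references to other sections
--         for other_section, other_data in sections.items():
--             if other_section != section_name:
--                 other_title = other_section.lower()
--                 if other_title in section_content or any(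
--                     word in section_content for word in other_title.split()[:3]
--                 ):
--                     related_sections.append(other_section)
--
--         relationships[section_name] = related_sections
--
--     return relationships
-- ===== SOURCE B (Python) =====
-- def _analyze_section_relationships(sections):
--     """Substring-index variant: per section, build the set of all substrings of
--     its content whose length matches some pattern length; each pattern test is
--     then one set lookup instead of a scan of the content."""
--     names = list(sections)
--     patterns = [[o.lower()] + o.lower().split()[:3] for o in names]
--     lengths = {len(p) for pats in patterns for p in pats}
--     relationships = {}
--     for name, data in sections.items():
--         c = data.get('content', '').lower()
--         subs = {c[i:i + l] for l in lengths for i in range(len(c) - l + 1)}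
--         relationships[name] = [o for o, pats in zip(names, patterns)
--                                if o != name and any(p in subs for p in pats)]
--     return relationships
-- ===== Notes on version B (the rewrite author's own statement) =====
-- stated objective: alternative
-- what changed: B replaces A's per-pair substring scans with a substring index: it collects the distinct pattern lengths once, builds for each section a hash set of all substrings of its content having one of those lengths, and tests every pattern by a single set lookup instead of scanning the content.
import Mathlib
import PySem

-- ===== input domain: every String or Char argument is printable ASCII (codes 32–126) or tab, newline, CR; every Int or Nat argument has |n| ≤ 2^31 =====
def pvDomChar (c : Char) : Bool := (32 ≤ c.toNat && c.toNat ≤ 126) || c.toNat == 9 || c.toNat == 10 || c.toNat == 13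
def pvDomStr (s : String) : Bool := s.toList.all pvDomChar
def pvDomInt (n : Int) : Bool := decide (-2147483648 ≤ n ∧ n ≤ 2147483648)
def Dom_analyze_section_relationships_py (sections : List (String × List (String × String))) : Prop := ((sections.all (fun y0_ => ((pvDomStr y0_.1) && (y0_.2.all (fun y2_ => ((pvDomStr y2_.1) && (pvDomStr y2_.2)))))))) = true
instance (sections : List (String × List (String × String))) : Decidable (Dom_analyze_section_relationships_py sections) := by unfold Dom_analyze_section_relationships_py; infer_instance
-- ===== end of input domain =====

-- B replaces A's per-pair substring scans with a per-section substring index (the set of all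
-- substrings of the content whose length is a pattern length), so each pattern test is a set
-- lookup; same results (objective: alternative).

-- ===== PORT A =====
def analyze_section_relationships_py (sections : List (String × List (String × String))) : List (String × List String) :=
  (sections.foldl (fun (relationships : PySem.Dict String (List String)) sd =>
    let section_content := PySem.Str.lower (PySem.Dict.getD (PySem.Dict.mk sd.2) "content" "")
    let related_sections := sections.foldl (fun rel od =>
      if od.1 ≠ sd.1 then
        let other_title := PySem.Str.lower od.1
        if PySem.Str.isIn other_title section_content ||
           ((PySem.Str.split₀ other_title).take 3).any (fun word => PySem.Str.isIn word section_content)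
        then rel ++ [od.1] else rel
      else rel) []
    relationships.insert sd.1 related_sections) PySem.Dict.empty).items

-- ===== PORT B =====
-- B-side helpers: the pattern list '[o.lower()] + o.lower().split()[:3]' of a title …
def pvPat (o : String) : List String :=
  PySem.Str.lower o :: (PySem.Str.split₀ (PySem.Str.lower o)).take 3

-- … and B's substring index '{c[i:i+l] for l in L for i in range(len(c) - l + 1)}'
def pvSubs (L : List Int) (c : String) : PySem.Set String :=
  PySem.Set.ofList (L.flatMap (fun l =>
    (PySem.List.pyRange 0 (PySem.Str.len c - l + 1) 1).map
      (fun i => PySem.Str.slice c (some i) (some (i + l)))))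

def analyze_section_relationships_py_alt (sections : List (String × List (String × String))) : List (String × List String) :=
  let names := sections.map (fun p => p.1)
  let patterns := names.map pvPat
  -- 'lengths = {len(p) for pats in patterns for p in pats}'
  let lengths : PySem.Set Int :=
    PySem.Set.ofList (patterns.flatMap (fun pats => pats.map (fun p => PySem.Str.len p)))
  (sections.foldl (fun (relationships : PySem.Dict String (List String)) sd =>
    let c := PySem.Str.lower (PySem.Dict.getD (PySem.Dict.mk sd.2) "content" "")
    let subs := pvSubs lengths c
    relationships.insert sd.1
      (((names.zip patterns).filter (fun op =>
          op.1 != sd.1 && op.2.any (fun p => PySem.Set.contains subs p))).map (fun op => op.1))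
    ) PySem.Dict.empty).items

-- ===== PRECONDITION & SPEC =====
def Spec_analyze_section_relationships_py (sections : List (String × List (String × String))) (out : List (String × List String)) : Prop := out = analyze_section_relationships_py_alt sections
instance (sections : List (String × List (String × String))) (out : List (String × List String)) : Decidable (Spec_analyze_section_relationships_py sections out) := by unfold Spec_analyze_section_relationships_py; infer_instance

-- ===== CLAIM (what is proved, stated in full; the proofs are below) =====
def Claim_equal_analyze_section_relationships_py : Prop := ∀ (sections : List (String × List (String × String))), Dom_analyze_section_relationships_py sections → Spec_analyze_section_relationships_py sections (analyze_section_relationships_py sections)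

-- ===== LEMMAS AND PROOFS =====

-- the per-section lowered content both programs compute
def pvContent (p : String × List (String × String)) : String :=
  PySem.Str.lower (PySem.Dict.getD (PySem.Dict.mk p.2) "content" "")

-- the match test A applies to a candidate title `o` for a section named `name` with lowered content `c`
def pvTest (o name c : String) : Bool :=
  (o != name) && (pvPat o).any (fun q => PySem.Str.isIn q c)

-- any clamped drop/take slice of a string is an infix of it
theorem pv_slice_infix (c : String) (i l : Int) (hi : 0 ≤ i) (hl : 0 ≤ l) :
    (PySem.Str.slice c (some i) (some (i + l))).toList <:+: c.toList := by
  rw [PySem.Str.toList_slice, PySem.Chars.slice_eq_listSlice,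
      PySem.List.slice_toNat _ hi (by omega)]
  exact ((List.take_prefix _ _).isInfix).trans (List.drop_suffix _ _).isInfix

-- membership in the substring index is exactly Python's 'p in c', for a pattern
-- whose length is one of the indexed lengths
theorem pv_mem_subs (L : List Int) (c p : String)
    (hmem : PySem.Str.len p ∈ L) (hL : ∀ l ∈ L, 0 ≤ l) :
    PySem.Set.contains (pvSubs L c) p = PySem.Str.isIn p c := by
  by_cases h : PySem.Str.isIn p c = true
  · rw [h]
    have hinf : p.toList <:+: c.toList := (PySem.Str.isIn_iff_infix p c).mp h
    obtain ⟨pre, suf, hps⟩ := hinf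
    have hcontains : p ∈ pvSubs L c := by
      rw [pvSubs, PySem.Set.mem_ofList, List.mem_flatMap]
      refine ⟨PySem.Str.len p, hmem, ?_⟩
      rw [List.mem_map]
      refine ⟨(pre.length : Int), ?_, ?_⟩
      · rw [PySem.List.mem_pyRange_one]
        constructor
        · exact_mod_cast Nat.zero_le _
        · have : c.toList.length = pre.length + p.toList.length + suf.length := by
            rw [← hps]; simp [List.length_append]; omega
          rw [PySem.Str.len_eq, PySem.Str.len_eq]
          omega
      · apply String.toList_inj.mp
        rw [PySem.Str.toList_slice, PySem.Chars.slice_eq_listSlice, PySem.Str.len_eq]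
        rw [PySem.List.slice_natCast_add]
        rw [← hps, List.append_assoc, List.drop_left, List.take_left]
    exact (PySem.Set.contains_iff _ _).mpr hcontains
  -- absent pattern: nothing in the index can be it, since every index entry is an infix
  · rw [Bool.not_eq_true] at h
    rw [h, ← Bool.not_eq_true, PySem.Set.contains_iff]
    intro hcontains
    rw [pvSubs, PySem.Set.mem_ofList, List.mem_flatMap] at hcontains
    obtain ⟨l, hlL, hmap⟩ := hcontains
    rw [List.mem_map] at hmap
    obtain ⟨i, hi, hslice⟩ := hmap
    rw [PySem.List.mem_pyRange_one] at hi
    have : PySem.Str.isIn p c = true := by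
      rw [PySem.Str.isIn_iff_infix, ← hslice]
      exact pv_slice_infix c i l hi.1 (hL l hlL)
    rw [h] at this; exact Bool.false_ne_true this

-- every pattern length of a listed title is in the collected length set
theorem pv_len_mem (names : List String) (o p : String) (ho : o ∈ names) (hp : p ∈ pvPat o) :
    PySem.Str.len p ∈ PySem.Set.ofList
      ((names.map pvPat).flatMap (fun pats => pats.map (fun q => PySem.Str.len q))) := by
  rw [PySem.Set.mem_ofList, List.mem_flatMap]
  exact ⟨pvPat o, List.mem_map_of_mem ho, List.mem_map_of_mem hp⟩

-- all collected lengths are nonnegative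
theorem pv_len_nonneg (names : List String) :
    ∀ l ∈ PySem.Set.ofList
      ((names.map pvPat).flatMap (fun pats => pats.map (fun q => PySem.Str.len q))), 0 ≤ l := by
  intro l hl
  rw [PySem.Set.mem_ofList, List.mem_flatMap] at hl
  obtain ⟨pats, _, hl⟩ := hl
  rw [List.mem_map] at hl
  obtain ⟨q, _, hq⟩ := hl
  rw [← hq, PySem.Str.len_eq]
  exact_mod_cast Nat.zero_le _

theorem pv_map_fst_filter (p : String → Bool) (l : List (String × List (String × String))) :
    (l.filter (fun od => p od.1)).map (fun od => od.1) = (l.map (fun od => od.1)).filter p := by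
  induction l with
  | nil => rfl
  | cons x xs ih => by_cases h : p x.1 <;> simp [h, ih]

-- A's inner loop computes the filtered list of matching titles
theorem pv_rowA (sections : List (String × List (String × String))) (name c : String) :
    sections.foldl (fun rel od =>
      if od.1 ≠ name then
        if PySem.Str.isIn (PySem.Str.lower od.1) c ||
           ((PySem.Str.split₀ (PySem.Str.lower od.1)).take 3).any (fun word => PySem.Str.isIn word c)
        then rel ++ [od.1] else rel
      else rel) []
      = (sections.map (fun p => p.1)).filter (fun o => pvTest o name c) := by
  have hfun : (fun (rel : List String) (od : String × List (String × String)) =>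
      if od.1 ≠ name then
        if PySem.Str.isIn (PySem.Str.lower od.1) c ||
           ((PySem.Str.split₀ (PySem.Str.lower od.1)).take 3).any (fun word => PySem.Str.isIn word c)
        then rel ++ [od.1] else rel
      else rel)
      = (fun rel od => if pvTest od.1 name c then rel ++ [od.1] else rel) := by
    funext rel od
    by_cases h1 : od.1 = name
    · simp [pvTest, h1]
    · simp [pvTest, pvPat, List.any_cons, h1]
  rw [hfun, PySem.List.foldl_append_if (fun od => pvTest od.1 name c)
        (fun od => od.1) sections []]
  rw [List.nil_append]
  exact pv_map_fst_filter (fun o => pvTest o name c) sections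

-- B's comprehension over the zipped (title, patterns) list computes the same filtered list
theorem pv_rowB (names : List String) (L : List Int)
    (hL0 : ∀ l ∈ L, 0 ≤ l)
    (hLmem : ∀ o ∈ names, ∀ p ∈ pvPat o, PySem.Str.len p ∈ L)
    (name c : String) :
    ((names.zip (names.map pvPat)).filter (fun op =>
        op.1 != name && op.2.any (fun p => PySem.Set.contains (pvSubs L c) p))).map (fun op => op.1)
      = names.filter (fun o => pvTest o name c) := by
  have hzip : names.zip (names.map pvPat) = names.map (fun o => (o, pvPat o)) := by
    rw [show names.zip (names.map pvPat) = (names.map id).zip (names.map pvPat) by rw [List.map_id]]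
    rw [List.zip_map']; rfl
  rw [hzip, List.filter_map]
  have : names.filter ((fun op : String × List String =>
      op.1 != name && op.2.any (fun p => PySem.Set.contains (pvSubs L c) p)) ∘ (fun o => (o, pvPat o)))
      = names.filter (fun o => pvTest o name c) := by
    apply List.filter_congr
    intro o ho
    simp only [Function.comp, pvTest]
    have hany : ∀ (ps : List String), (∀ p ∈ ps, PySem.Str.len p ∈ L) →
        ps.any (fun p => PySem.Set.contains (pvSubs L c) p)
          = ps.any (fun q => PySem.Str.isIn q c) := by
      intro ps hps
      induction ps with
      | nil => rfl
      | cons q qs ih =>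
        simp only [List.any_cons]
        rw [pv_mem_subs L c q (hps q (List.mem_cons_self)) hL0,
            ih (fun p hp => hps p (List.mem_cons_of_mem _ hp))]
    rw [hany (pvPat o) (hLmem o ho)]
  rw [this]
  have hfst : ((fun op : String × List String => op.1) ∘ fun o => (o, pvPat o)) = id := rfl
  rw [List.map_map, hfst, List.map_id]

-- ===== VERDICT =====
theorem analyze_section_relationships_py_spec : Claim_equal_analyze_section_relationships_py := by
  intro sections _
  unfold Spec_analyze_section_relationships_py
  unfold analyze_section_relationships_py analyze_section_relationships_py_alt
  dsimp only
  congr 1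
  congr 1
  funext d sd
  congr 1
  rw [pv_rowA sections sd.1]
  exact (pv_rowB (sections.map (fun p => p.1))
      (PySem.Set.ofList (((sections.map (fun p => p.1)).map pvPat).flatMap
        (fun pats => pats.map (fun q => PySem.Str.len q))))
      (pv_len_nonneg _) (fun o ho p hp => pv_len_mem _ o p ho hp) sd.1
      (PySem.Str.lower (PySem.Dict.getD (PySem.Dict.mk sd.2) "content" ""))).symm
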